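-- pv_equiv track=rewrite | github.com/youngkwon02/Simplified-Java-Compiler | lexical_analyzer.py | is_before_lparen
-- ===== SOURCE A (Python) =====
-- def is_before_lparen(index, content):
--     while(index > 0):
--         if(content[index] == "("):
--             return True
--         elif(content[index] == ")"):
--             return False
--         index -= 1
--     return False
-- ===== SOURCE B (Python) =====
-- def is_before_lparen(index, content):
--     result = False
--     for i in range(1, index + 1):
--         if content[i] == "(":
--             result = True
--         elif content[i] == ")":
--             result = False
--     return result
-- ===== Notes on version B (the rewrite author's own statement) =====
-- stated objective: alternative
-- what changed: Replaces A's backward early-exit while-loop with a forward scan over range(1, index+1) that maintains a running boolean set by the parens seen, whose final value equals the nearest paren at-or-before index.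
import Mathlib
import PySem

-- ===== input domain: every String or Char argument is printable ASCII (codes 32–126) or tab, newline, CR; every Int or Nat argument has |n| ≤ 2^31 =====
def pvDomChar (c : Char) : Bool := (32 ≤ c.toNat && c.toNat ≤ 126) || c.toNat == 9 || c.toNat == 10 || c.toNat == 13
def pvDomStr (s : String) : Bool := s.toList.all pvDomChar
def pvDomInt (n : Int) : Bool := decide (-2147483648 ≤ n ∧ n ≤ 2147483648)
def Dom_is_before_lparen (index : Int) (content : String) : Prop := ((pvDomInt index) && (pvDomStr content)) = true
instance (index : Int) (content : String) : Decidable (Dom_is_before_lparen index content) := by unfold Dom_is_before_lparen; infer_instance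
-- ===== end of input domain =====

-- B replaces A's backward early-exit while-loop with a forward scan keeping a running boolean (alternative decomposition, same cost).


-- ===== PORT A =====
-- while(index > 0): check content[index], early-return on '(' / ')', else index -= 1.
-- Recursion on index.toNat (the loop counter); content[index] via PySem.List.pyGet?
-- (the none = IndexError case is excluded by Pre_, the port returns false there).
def isBeforeLparenGoA (cs : List Char) : Nat → Bool
  | 0 => false
  | n + 1 =>
    match PySem.List.pyGet? cs ((n : Int) + 1) with
    | some '(' => true
    | some ')' => false
    | some _ => isBeforeLparenGoA cs n
    | none => false

def is_before_lparen (index : Int) (content : String) : Bool :=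
  isBeforeLparenGoA content.toList index.toNat

-- ===== PORT B =====
-- result = False; for i in range(1, index+1): '(' sets it, ')' clears it; return result.
def is_before_lparen_alt (index : Int) (content : String) : Bool :=
  (PySem.List.pyRange 1 (index + 1) 1).foldl
    (fun result i =>
      match PySem.List.pyGet? content.toList i with
      | some '(' => true
      | some ')' => false
      | _ => result) false

-- ===== PRECONDITION & SPEC =====
-- Pre_ excludes exactly the inputs where Python A raises IndexError: index > 0 but out of range.
def Pre_is_before_lparen (index : Int) (content : String) : Prop :=
  index ≤ 0 ∨ index < (content.toList.length : Int)
instance (index : Int) (content : String) : Decidable (Pre_is_before_lparen index content) := by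
  unfold Pre_is_before_lparen; infer_instance

def pvWitness_is_before_lparen : Int × String := (2, "a(b")

def Spec_is_before_lparen (index : Int) (content : String) (out : Bool) : Prop := out = is_before_lparen_alt index content
instance (index : Int) (content : String) (out : Bool) : Decidable (Spec_is_before_lparen index content out) := by unfold Spec_is_before_lparen; infer_instance

-- ===== CLAIM (what is proved, stated in full; the proofs are below) =====
def Claim_equal_is_before_lparen : Prop := ∀ (index : Int) (content : String), Dom_is_before_lparen index content → Pre_is_before_lparen index content → Spec_is_before_lparen index content (is_before_lparen index content)

-- ===== LEMMAS AND PROOFS =====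

theorem isBeforeLparen_go_eq_foldl (cs : List Char) (n : Nat) (hn : n < cs.length) :
    isBeforeLparenGoA cs n =
      (PySem.List.pyRange 1 ((n : Int) + 1) 1).foldl
        (fun result i =>
          match PySem.List.pyGet? cs i with
          | some '(' => true
          | some ')' => false
          | _ => result) false := by
  induction n with
  | zero =>
    rw [PySem.List.pyRange_one_eq_nil (by norm_num)]
    rfl
  | succ m ih =>
    have h1 : (1 : Int) ≤ (m : Int) + 1 := by omega
    have hsplit : PySem.List.pyRange 1 ((m : Int) + 1 + 1) 1
        = PySem.List.pyRange 1 ((m : Int) + 1) 1 ++ [(m : Int) + 1] :=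
      PySem.List.pyRange_one_succ_right h1
    have hidx : PySem.List.pyGet? cs ((m : Int) + 1) = some cs[m + 1] := by
      have : ((m : Int) + 1) = ((m + 1 : Nat) : Int) := by push_cast; ring
      rw [this, PySem.List.pyGet?_natCast, List.getElem?_eq_getElem hn]
    have hm : m < cs.length := Nat.lt_of_succ_lt hn
    show isBeforeLparenGoA cs (m + 1) = _
    push_cast
    rw [hsplit, List.foldl_append]
    simp only [List.foldl_cons, List.foldl_nil]
    rw [hidx]
    unfold isBeforeLparenGoA
    rw [hidx, ← ih hm]
    split <;> simp_all

-- ===== VERDICT (by name: the statement is the Claim_ definition above) =====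
theorem is_before_lparen_spec : Claim_equal_is_before_lparen := by
  intro index content _hdom hpre
  unfold Spec_is_before_lparen is_before_lparen is_before_lparen_alt
  by_cases hle : index ≤ 0
  · have h0 : index.toNat = 0 := Int.toNat_of_nonpos hle
    rw [h0, PySem.List.pyRange_one_eq_nil (by omega)]
    rfl
  · have hpos : 0 < index := by omega
    rcases hpre with h | hlt
    · omega
    · have hcast : ((index.toNat : Int)) = index := Int.toNat_of_nonneg (le_of_lt hpos)
      have hn : index.toNat < content.toList.length := by omega
      have := isBeforeLparen_go_eq_foldl content.toList index.toNat hn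
      rw [this, hcast]
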